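-- pv_equiv track=rewrite | github.com/DrakenKiele/IX-TECH_BETA_091420250247 | file_information_data/mark_core_files_from_source.py | traverse_core
-- ===== SOURCE A (Python) =====
-- def traverse_core(graph, entry_points):
--     core = set()
--     def visit(node):
--         if node in core:
--             return
--         core.add(node)
--         for dep in graph.get(node, []):
--             if dep in graph:
--                 visit(dep)
--     for entry in entry_points:
--         visit(entry)
--     return core
-- ===== SOURCE B (Python) =====
-- def traverse_core(graph, entry_points):
--     core = set()
--     stack = list(reversed(entry_points))
--     while stack:
--         node = stack.pop()
--         if node in core:
--             continue
--         core.add(node)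
--         stack.extend(reversed([dep for dep in graph.get(node, []) if dep in graph]))
--     return core
-- ===== Notes on version B (the rewrite author's own statement) =====
-- stated objective: alternative
-- what changed: The recursive nested-closure DFS is replaced by an iterative DFS that threads the frontier through an explicit stack list instead of the Python call stack.
import Mathlib
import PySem

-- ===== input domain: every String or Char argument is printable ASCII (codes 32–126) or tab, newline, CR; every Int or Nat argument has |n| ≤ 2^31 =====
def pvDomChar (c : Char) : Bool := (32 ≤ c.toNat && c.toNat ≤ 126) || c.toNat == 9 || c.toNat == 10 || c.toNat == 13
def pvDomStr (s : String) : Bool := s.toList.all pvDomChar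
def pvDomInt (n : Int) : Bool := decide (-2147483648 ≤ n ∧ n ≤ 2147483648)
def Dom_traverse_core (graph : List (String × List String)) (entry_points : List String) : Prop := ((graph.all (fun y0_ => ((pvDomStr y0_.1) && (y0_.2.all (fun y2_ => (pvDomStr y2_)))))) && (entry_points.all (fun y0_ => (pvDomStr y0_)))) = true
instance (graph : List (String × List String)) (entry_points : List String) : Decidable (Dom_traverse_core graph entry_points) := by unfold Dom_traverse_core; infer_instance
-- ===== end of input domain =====

-- B replaces A's recursive nested-closure DFS by an iterative DFS over an explicit stack list (objective: alternative decomposition, same cost).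
-- Python's `set` has no modelled iteration order; both ports return the PySem.Set of visited nodes (insertion order), compared as a set.

-- ===== PORT A =====
-- A's inner recursive `visit`. The Nat argument is fuel making the recursion total;
-- `graph.length + 2` is proved sufficient by the equivalence theorem below (the
-- recursion adds a distinct graph key to `core` at every nested proceeding call).
def visitA (graph : List (String × List String)) : Nat → PySem.Set String → String → PySem.Set String
  | 0, core, _ => core
  | f + 1, core, node =>
    if PySem.Set.contains core node then core            -- if node in core: return
    else
      ((PySem.Dict.getD ⟨graph⟩ node []).foldl           -- for dep in graph.get(node, []):
        (fun c dep =>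
          if PySem.Dict.contains (PySem.Dict.mk graph) dep  -- if dep in graph:
          then visitA graph f c dep                      --   visit(dep)
          else c)
        (PySem.Set.add core node))                       -- core.add(node)

def traverse_core (graph : List (String × List String)) (entry_points : List String) : List String :=
  entry_points.foldl (fun core entry => visitA graph (graph.length + 2) core entry) PySem.Set.empty

-- ===== PORT B =====
-- Lemmas cited by loopB's decreasing_by (termination of the while loop).
theorem pv_getD_len (graph : List (String × List String)) (n : String) :
    (PySem.Dict.getD ⟨graph⟩ n []).length ≤ (graph.map (fun p => p.2.length)).sum := by
  rw [PySem.Dict.getD_eq_get?_getD]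
  induction graph with
  | nil => simp [PySem.Dict.get?]
  | cons p g ih =>
    obtain ⟨k, v⟩ := p
    rw [PySem.Dict.get?_mk_cons]
    split
    · simp
    · simp only [List.map_cons, List.sum_cons]
      omega

theorem pv_card_skip (graph : List (String × List String)) (core rest : List String) (node : String) :
    (((graph.map Prod.fst) ++ rest).toFinset \ core.toFinset).card
      ≤ (((graph.map Prod.fst) ++ node :: rest).toFinset \ core.toFinset).card := by
  apply Finset.card_le_card
  apply Finset.sdiff_subset_sdiff _ (Finset.Subset.refl _)
  intro x hx
  simp only [List.mem_toFinset, List.mem_append, List.mem_cons] at hx ⊢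
  tauto

theorem pv_card_push (graph : List (String × List String)) (core rest : List String) (node : String)
    (hnc : node ∉ core) :
    (((graph.map Prod.fst) ++ ((PySem.Dict.getD ⟨graph⟩ node []).filter
        (fun d => PySem.Dict.contains (PySem.Dict.mk graph) d) ++ rest)).toFinset
      \ (PySem.Set.add core node).toFinset).card + 1
    ≤ (((graph.map Prod.fst) ++ node :: rest).toFinset \ core.toFinset).card := by
  have hmem : node ∈ ((graph.map Prod.fst) ++ node :: rest).toFinset \ core.toFinset := by
    simp [hnc]
  have hsub : ((graph.map Prod.fst) ++ ((PySem.Dict.getD ⟨graph⟩ node []).filter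
        (fun d => PySem.Dict.contains (PySem.Dict.mk graph) d) ++ rest)).toFinset
      \ (PySem.Set.add core node).toFinset
      ⊆ (((graph.map Prod.fst) ++ node :: rest).toFinset \ core.toFinset).erase node := by
    intro x hx
    have hadd : node ∈ PySem.Set.add core node := (PySem.Set.mem_add core node node).mpr (Or.inr rfl)
    have hcs : core ⊆ PySem.Set.add core node := by
      intro y hy; exact (PySem.Set.mem_add core node y).mpr (Or.inl hy)
    simp only [Finset.mem_sdiff, List.mem_toFinset, List.mem_append, List.mem_cons,
      List.mem_filter, Finset.mem_erase] at hx ⊢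
    obtain ⟨hxin, hxout⟩ := hx
    refine ⟨fun h => hxout (h ▸ hadd), ?_, fun h => hxout (hcs h)⟩
    rcases hxin with h | ⟨hf, hk⟩ | h
    · exact Or.inl h
    · have := (PySem.Dict.contains_iff_mem_keys (PySem.Dict.mk graph) x).mp hk
      simp only [PySem.Dict.keys] at this
      exact Or.inl this
    · exact Or.inr (Or.inr h)
  have h1 := Finset.card_le_card hsub
  rw [Finset.card_erase_of_mem hmem] at h1
  have h2 : 1 ≤ (((graph.map Prod.fst) ++ node :: rest).toFinset \ core.toFinset).card :=
    Finset.card_pos.mpr ⟨node, hmem⟩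
  omega

theorem pv_not_mem_of_contains_false {core : List String} {node : String}
    (h : ¬ PySem.Set.contains core node = true) : node ∉ core := by
  simpa [PySem.Set.contains, List.contains_iff_mem] using h

-- B's while loop. The Lean stack list holds the Python stack top-first (Lean head
-- = end of the Python list), so `stack.pop()` is taking the head, the initial
-- stack `list(reversed(entry_points))` is the list `entry_points`, and
-- `stack.extend(reversed(filtered))` is `filtered ++ rest`.
def loopB (graph : List (String × List String)) (core : PySem.Set String) (stack : List String) :
    PySem.Set String :=
  match stack with
  | [] => core                                            -- while stack:
  | node :: rest =>                                       --   node = stack.pop()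
    if PySem.Set.contains core node then                  --   if node in core: continue
      loopB graph core rest
    else
      loopB graph (PySem.Set.add core node)               --   core.add(node)
        ((PySem.Dict.getD ⟨graph⟩ node []).filter         --   stack.extend(reversed(
            (fun d => PySem.Dict.contains (PySem.Dict.mk graph) d)   -- [dep for dep in graph.get(node, []) if dep in graph]))
          ++ rest)
termination_by
  (((graph.map Prod.fst) ++ stack).toFinset \ core.toFinset).card
      * ((graph.map (fun p => p.2.length)).sum + 1) + stack.length
decreasing_by
  · have h := pv_card_skip graph core rest node
    simp only [List.length_cons]
    nlinarith [Nat.mul_le_mul_right ((graph.map (fun p => p.2.length)).sum + 1) h]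
  · rename_i hc
    have h := pv_card_push graph core rest node (pv_not_mem_of_contains_false hc)
    have hf : ((PySem.Dict.getD ⟨graph⟩ node []).filter
        (fun d => PySem.Dict.contains (PySem.Dict.mk graph) d)).length
        ≤ (graph.map (fun p => p.2.length)).sum :=
      le_trans (List.length_filter_le _ _) (pv_getD_len graph node)
    simp only [List.length_append, List.length_cons]
    nlinarith [Nat.mul_le_mul_right ((graph.map (fun p => p.2.length)).sum + 1)
      (Nat.le_sub_one_of_lt (Nat.lt_of_lt_of_le (Nat.lt_succ_self _) h))]

def traverse_core_alt (graph : List (String × List String)) (entry_points : List String) : List String :=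
  loopB graph PySem.Set.empty entry_points               -- core = set(); stack = list(reversed(entry_points)); while …; return core

-- ===== PRECONDITION & SPEC =====
def Spec_traverse_core (graph : List (String × List String)) (entry_points : List String) (out : List String) : Prop := out = traverse_core_alt graph entry_points
instance (graph : List (String × List String)) (entry_points : List String) (out : List String) : Decidable (Spec_traverse_core graph entry_points out) := by unfold Spec_traverse_core; infer_instance

-- ===== CLAIM (what is proved, stated in full; the proofs are below) =====
def Claim_equal_traverse_core : Prop := ∀ (graph : List (String × List String)) (entry_points : List String), Dom_traverse_core graph entry_points → Spec_traverse_core graph entry_points (traverse_core graph entry_points)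

-- ===== LEMMAS AND PROOFS =====

theorem pv_mem_of_contains_true {core : List String} {node : String}
    (h : PySem.Set.contains core node = true) : node ∈ core := by
  simpa [PySem.Set.contains, List.contains_iff_mem] using h

-- Number of graph keys not yet in core: the fuel budget of A's recursion.
def pvNK (graph : List (String × List String)) (core : List String) : Nat :=
  (((graph.map Prod.fst).toFinset) \ core.toFinset).card

theorem pv_NK_le (graph : List (String × List String)) (core : List String) :
    pvNK graph core ≤ graph.length := by
  unfold pvNK
  calc ((graph.map Prod.fst).toFinset \ core.toFinset).card
      ≤ (graph.map Prod.fst).toFinset.card := Finset.card_le_card (Finset.sdiff_subset)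
    _ ≤ (graph.map Prod.fst).length := List.toFinset_card_le _
    _ = graph.length := List.length_map _

theorem pv_NK_mono (graph : List (String × List String)) {core core' : List String}
    (h : ∀ x, x ∈ core → x ∈ core') : pvNK graph core' ≤ pvNK graph core := by
  apply Finset.card_le_card
  apply Finset.sdiff_subset_sdiff (Finset.Subset.refl _)
  intro x hx
  simp only [List.mem_toFinset] at hx ⊢
  exact h x hx

theorem pv_NK_add_key (graph : List (String × List String)) {core : List String} {node : String}
    (hk : node ∈ graph.map Prod.fst) (hc : node ∉ core) :
    pvNK graph (PySem.Set.add core node) + 1 ≤ pvNK graph core := by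
  unfold pvNK
  have hmem : node ∈ (graph.map Prod.fst).toFinset \ core.toFinset := by simp [hk, hc]
  have hsub : (graph.map Prod.fst).toFinset \ (PySem.Set.add core node).toFinset
      ⊆ ((graph.map Prod.fst).toFinset \ core.toFinset).erase node := by
    intro x hx
    have hadd : node ∈ PySem.Set.add core node := (PySem.Set.mem_add core node node).mpr (Or.inr rfl)
    have hcs : core ⊆ PySem.Set.add core node := by
      intro y hy; exact (PySem.Set.mem_add core node y).mpr (Or.inl hy)
    simp only [Finset.mem_sdiff, List.mem_toFinset, Finset.mem_erase] at hx ⊢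
    exact ⟨fun h => hx.2 (h ▸ hadd), hx.1, fun h => hx.2 (hcs h)⟩
  have h1 := Finset.card_le_card hsub
  rw [Finset.card_erase_of_mem hmem] at h1
  have h2 : 1 ≤ ((graph.map Prod.fst).toFinset \ core.toFinset).card :=
    Finset.card_pos.mpr ⟨node, hmem⟩
  omega

theorem loopB_nil (graph : List (String × List String)) (core : PySem.Set String) :
    loopB graph core [] = core := by rw [loopB]

theorem loopB_cons_mem (graph : List (String × List String)) (core : PySem.Set String)
    (node : String) (rest : List String) (h : PySem.Set.contains core node = true) :
    loopB graph core (node :: rest) = loopB graph core rest := by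
  rw [loopB]; simp [pv_mem_of_contains_true h]

theorem loopB_cons_new (graph : List (String × List String)) (core : PySem.Set String)
    (node : String) (rest : List String) (h : ¬ PySem.Set.contains core node = true) :
    loopB graph core (node :: rest)
      = loopB graph (PySem.Set.add core node)
          ((PySem.Dict.getD ⟨graph⟩ node []).filter
              (fun d => PySem.Dict.contains (PySem.Dict.mk graph) d) ++ rest) := by
  rw [loopB]; simp [pv_not_mem_of_contains_false h]

theorem pv_fold_mono (graph : List (String × List String)) (f : Nat)
    (H : ∀ (core : List String) (node x : String), x ∈ core → x ∈ visitA graph f core node) :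
    ∀ (deps : List String) (core : List String) (x : String), x ∈ core →
      x ∈ deps.foldl
        (fun c dep => if PySem.Dict.contains (PySem.Dict.mk graph) dep then visitA graph f c dep else c)
        core := by
  intro deps
  induction deps with
  | nil => intro core x hx; simpa using hx
  | cons d ds ih =>
    intro core x hx
    simp only [List.foldl_cons]
    apply ih
    split
    · exact H core d x hx
    · exact hx

theorem pv_visitA_mono (graph : List (String × List String)) :
    ∀ (f : Nat) (core : List String) (node x : String), x ∈ core → x ∈ visitA graph f core node := by
  intro f
  induction f with
  | zero => intro core node x hx; simpa [visitA] using hx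
  | succ f ih =>
    intro core node x hx
    simp only [visitA]
    split
    · exact hx
    · exact pv_fold_mono graph f ih _ _ x ((PySem.Set.mem_add core node x).mpr (Or.inl hx))

-- The simulation lemma: with enough fuel, running the stack loop on a filtered
-- dependency list is folding A's `visit` over that list.
theorem pv_sim (graph : List (String × List String)) :
    ∀ (f : Nat) (deps core rest : List String), pvNK graph core + 1 ≤ f →
      loopB graph core
          ((deps.filter (fun d => PySem.Dict.contains (PySem.Dict.mk graph) d)) ++ rest)
        = loopB graph
            (deps.foldl
              (fun c dep =>
                if PySem.Dict.contains (PySem.Dict.mk graph) dep then visitA graph f c dep else c)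
              core)
            rest := by
  intro f
  induction f with
  | zero => intro deps core rest h; omega
  | succ f ihf =>
    intro deps
    induction deps with
    | nil => intro core rest _; simp
    | cons d ds ihd =>
      intro core rest h
      by_cases hk : PySem.Dict.contains (PySem.Dict.mk graph) d = true
      · by_cases hc : PySem.Set.contains core d = true
        · rw [List.filter_cons_of_pos hk, List.cons_append, loopB_cons_mem graph core d _ hc]
          have hv : visitA graph (f + 1) core d = core := by
            simp [visitA, pv_mem_of_contains_true hc]
          simp only [List.foldl_cons, hk, if_true, hv]
          exact ihd core rest h
        · have hdm : d ∉ core := pv_not_mem_of_contains_false hc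
          have hdk : d ∈ graph.map Prod.fst := by
            have := (PySem.Dict.contains_iff_mem_keys (PySem.Dict.mk graph) d).mp hk
            simpa [PySem.Dict.keys] using this
          rw [List.filter_cons_of_pos hk, List.cons_append,
            loopB_cons_new graph core d _ hc]
          have hfuel : pvNK graph (PySem.Set.add core d) + 1 ≤ f := by
            have := pv_NK_add_key graph hdk hdm
            omega
          rw [ihf (PySem.Dict.getD ⟨graph⟩ d []) (PySem.Set.add core d) _ hfuel]
          have hv : visitA graph (f + 1) core d
              = (PySem.Dict.getD ⟨graph⟩ d []).foldl
                  (fun c dep =>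
                    if PySem.Dict.contains (PySem.Dict.mk graph) dep then visitA graph f c dep else c)
                  (PySem.Set.add core d) := by
            simp [visitA, pv_not_mem_of_contains_false hc]
          rw [← hv]
          have hfuel2 : pvNK graph (visitA graph (f + 1) core d) + 1 ≤ f + 1 := by
            have := pv_NK_mono graph (fun x hx => pv_visitA_mono graph (f + 1) core d x hx)
            omega
          rw [ihd (visitA graph (f + 1) core d) rest hfuel2]
          have hk' : (graph.any fun p => p.1 == d) = true := by
            simpa [PySem.Dict.contains] using hk
          simp [hk']
      · rw [List.filter_cons_of_neg (by simpa using hk)]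
        have := ihd core rest h
        simp only [List.foldl_cons, hk] at this ⊢
        simpa [hk] using this

-- Processing the entry points: the stack loop equals folding A's visit.
theorem pv_top (graph : List (String × List String)) :
    ∀ (es : List String) (core : List String),
      loopB graph core es
        = es.foldl (fun c e => visitA graph (graph.length + 2) c e) core := by
  intro es
  induction es with
  | nil => intro core; simp [loopB_nil]
  | cons e es ih =>
    intro core
    by_cases hc : PySem.Set.contains core e = true
    · rw [loopB_cons_mem graph core e es hc]
      have hv : visitA graph (graph.length + 2) core e = core := by
        show visitA graph (graph.length + 1 + 1) core e = core
        simp [visitA, pv_mem_of_contains_true hc]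
      simp only [List.foldl_cons, hv]
      exact ih core
    · rw [loopB_cons_new graph core e es hc]
      have hfuel : pvNK graph (PySem.Set.add core e) + 1 ≤ graph.length + 1 := by
        have := pv_NK_le graph (PySem.Set.add core e)
        omega
      rw [pv_sim graph (graph.length + 1) (PySem.Dict.getD ⟨graph⟩ e []) (PySem.Set.add core e) es hfuel]
      have hv : visitA graph (graph.length + 2) core e
          = (PySem.Dict.getD ⟨graph⟩ e []).foldl
              (fun c dep =>
                if PySem.Dict.contains (PySem.Dict.mk graph) dep
                then visitA graph (graph.length + 1) c dep else c)
              (PySem.Set.add core e) := by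
        show visitA graph (graph.length + 1 + 1) core e = _
        simp [visitA, pv_not_mem_of_contains_false hc]
      rw [← hv, List.foldl_cons]
      exact ih (visitA graph (graph.length + 2) core e)

-- ===== VERDICT (by name: the statement is the Claim_ definition above) =====
theorem traverse_core_spec : Claim_equal_traverse_core := by
  intro graph entry_points _
  unfold Spec_traverse_core traverse_core traverse_core_alt
  exact (pv_top graph entry_points PySem.Set.empty).symm
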